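-- pv_equiv track=rewrite | github.com/pierfrancescomartinello/IT-DC-Portfolio | Ex 3 - Universal Codes.py | levenshtein_coding
-- ===== SOURCE A (Python) =====
-- def levenshtein_coding(numbers):#297
--     number = ""
--     code = ""
--     for index, i in enumerate(numbers):
--         if i == " ":# When we encounter a space ...
--             code += levenshtein_coding_sn(int(number)) # ...we code the number
--             number = ""
--         elif index == len(numbers) -1:
--             number += i
--             code += levenshtein_coding_sn(int(number))# The codification of the last number
--             number = ""
--         else:
--             number += i
--
--     return code
--
-- def levenshtein_coding_sn(number):
--     if number == 0:
--         return "0"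
--     else:
--         code = ""
--         c = 1
--         m = number
--         while m != 0:
--             bin_rep = bin(int(m))[3:] #Get the binary representation of M without the leading "1"
--             code = bin_rep + code
--             if bin_rep != "": # If the binary representation is not empty
--                 c += 1
--                 m = len(bin_rep)# Set m to the lenght of the binary representation
--             else:
--                 code = "1" * c + "0" + code
--                 m = 0
--     return code
-- ===== SOURCE B (Python) =====
-- def levenshtein_coding(numbers):
--     tokens = numbers.split(" ")
--     if tokens[-1] == "":
--         tokens.pop()
--     return "".join(levenshtein_coding_sn(int(t)) for t in tokens)
--
-- def levenshtein_coding_sn(number):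
--     if number == 0:
--         return "0"
--     else:
--         code = ""
--         c = 1
--         m = number
--         while m != 0:
--             bin_rep = bin(int(m))[3:]
--             code = bin_rep + code
--             if bin_rep != "":
--                 c += 1
--                 m = len(bin_rep)
--             else:
--                 code = "1" * c + "0" + code
--                 m = 0
--     return code
-- ===== Notes on version B (the rewrite author's own statement) =====
-- stated objective: simpler
-- what changed: Replaces A's fused char-by-char scan with index bookkeeping and a running partial-token buffer by a two-stage decomposition: split the string on spaces, drop the trailing empty token from a final space, then encode each token with the unchanged helper.
import Mathlib
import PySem

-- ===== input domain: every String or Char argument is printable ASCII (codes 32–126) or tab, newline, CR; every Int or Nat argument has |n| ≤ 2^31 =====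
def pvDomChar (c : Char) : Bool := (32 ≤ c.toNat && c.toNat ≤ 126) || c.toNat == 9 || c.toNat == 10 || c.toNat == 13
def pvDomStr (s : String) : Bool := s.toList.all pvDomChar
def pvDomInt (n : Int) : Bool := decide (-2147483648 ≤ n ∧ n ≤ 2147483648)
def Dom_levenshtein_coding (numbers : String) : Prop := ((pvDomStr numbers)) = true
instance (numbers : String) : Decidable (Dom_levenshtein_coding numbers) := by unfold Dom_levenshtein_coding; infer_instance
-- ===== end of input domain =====

-- B replaces A's fused char-by-char scan with tokenize-then-encode (split on " ", drop a trailing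
-- empty token, encode each); objective: simpler decomposition, same values wherever A returns.

-- ===== PORT A =====
-- shared helper levenshtein_coding_sn (identical in Source A and Source B); the while loop is ported with a
-- fuel counter m.natAbs + 3, which exceeds the loop's iteration count on every input (for m ≥ 2 the
-- next m is the bit-length of m minus one, < m; a negative m becomes positive after one step).
-- bin(int(m))[3:] is ported exactly via PySem.Int.toBinChars0b and PySem.List.slice.
def snGo : Nat → List Char → Nat → Int → List Char
  | 0, code, _, _ => code
  | fuel+1, code, c, m =>
    if m = 0 then code
    else
      let bin_rep := PySem.List.slice (PySem.Int.toBinChars0b m) (some 3) none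
      if bin_rep ≠ [] then snGo fuel (bin_rep ++ code) (c+1) (bin_rep.length)
      else List.replicate c '1' ++ '0' :: code   -- code = "1"*c + "0" + code; m = 0 → loop exits

def snChars (number : Int) : List Char :=
  if number = 0 then ['0'] else snGo (number.natAbs + 3) [] 1 number

-- int(number): Pre_ guarantees ofChars? succeeds on every string A passes to int; .getD 0 is never hit there
def encTok (t : List Char) : List Char := snChars ((PySem.Int.ofChars? t).getD 0)

-- A's for-loop over enumerate(numbers) with state (number, code); idx/total realise `index == len(numbers)-1`
def levGo : List Char → Nat → Nat → List Char → List Char → List Char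
  | [], _, _, _, code => code
  | i :: rest, idx, total, number, code =>
    if i = ' ' then levGo rest (idx+1) total [] (code ++ encTok number)
    else if idx = total - 1 then levGo rest (idx+1) total [] (code ++ encTok (number ++ [i]))
    else levGo rest (idx+1) total (number ++ [i]) code

def levenshtein_coding (numbers : String) : String :=
  String.mk (levGo numbers.toList 0 numbers.toList.length [] [])

-- ===== PORT B =====
-- numbers.split(" ") for the one-char separator " " (Python semantics: "" → [""], empty pieces kept)
def splitSp : List Char → List (List Char)
  | [] => [[]]
  | c :: rest =>
    if c = ' ' then [] :: splitSp rest
    else match splitSp rest with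
      | t :: ts => (c :: t) :: ts
      | [] => [[c]]

def levenshtein_coding_alt (numbers : String) : String :=
  let tokens := splitSp numbers.toList
  let tokens := if tokens.getLast? = some [] then tokens.dropLast else tokens
  String.mk ((tokens.map encTok).flatten)

-- ===== PRECONDITION & SPEC =====
-- tokenization duplicated for Pre_ only (Pre_ may not share definitions with the ports)
def pvTokSplit : List Char → List (List Char)
  | [] => [[]]
  | c :: rest =>
    if c = ' ' then [] :: pvTokSplit rest
    else match pvTokSplit rest with
      | t :: ts => (c :: t) :: ts
      | [] => [[c]]

-- Pre_ admits exactly the inputs on which Python A returns: every space-separated token that A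
-- passes to int() (all tokens, except a trailing empty one after a final space) parses as a Python
-- int literal; otherwise A raises ValueError (B raises on exactly the same inputs).
def Pre_levenshtein_coding (numbers : String) : Prop :=
  ∀ t ∈ (let ts := pvTokSplit numbers.toList;
         if ts.getLast? = some [] then ts.dropLast else ts),
    (PySem.Int.ofChars? t).isSome = true
instance (numbers : String) : Decidable (Pre_levenshtein_coding numbers) := by
  unfold Pre_levenshtein_coding; infer_instance

def pvWitness_levenshtein_coding : String := "4 13 0 "

def Spec_levenshtein_coding (numbers : String) (out : String) : Prop := out = levenshtein_coding_alt numbers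
instance (numbers : String) (out : String) : Decidable (Spec_levenshtein_coding numbers out) := by unfold Spec_levenshtein_coding; infer_instance

-- ===== CLAIM (what is proved, stated in full; the proofs are below) =====
def Claim_equal_levenshtein_coding : Prop := ∀ (numbers : String), Dom_levenshtein_coding numbers → Pre_levenshtein_coding numbers → Spec_levenshtein_coding numbers (levenshtein_coding numbers)

-- ===== LEMMAS AND PROOFS =====

theorem splitSp_ne_nil (cs : List Char) : splitSp cs ≠ [] := by
  cases cs with
  | nil => simp [splitSp]
  | cons c rest =>
    simp only [splitSp]
    split
    · simp
    · cases h : splitSp rest <;> simp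

theorem splitSp_no_space {n : List Char} (h : ' ' ∉ n) : splitSp n = [n] := by
  induction n with
  | nil => rfl
  | cons c rest ih =>
    have hc : c ≠ ' ' := by intro hc; exact h (by simp [hc])
    have hr : ' ' ∉ rest := fun hm => h (List.mem_cons_of_mem _ hm)
    simp only [splitSp, if_neg hc, ih hr]

theorem splitSp_append_space {n : List Char} (rest : List Char) (h : ' ' ∉ n) :
    splitSp (n ++ ' ' :: rest) = n :: splitSp rest := by
  induction n with
  | nil => simp [splitSp]
  | cons c m ih =>
    have hc : c ≠ ' ' := by intro hc; exact h (by simp [hc])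
    have hm : ' ' ∉ m := fun hmm => h (List.mem_cons_of_mem _ hmm)
    simp only [List.cons_append, splitSp, if_neg hc, ih hm]

-- the effective token list (trailing empty token dropped)
def toks (cs : List Char) : List (List Char) :=
  let ts := splitSp cs
  if ts.getLast? = some [] then ts.dropLast else ts

theorem toks_append_space {n : List Char} (rest : List Char) (h : ' ' ∉ n) :
    toks (n ++ ' ' :: rest) = n :: toks rest := by
  simp only [toks, splitSp_append_space rest h]
  cases hts : splitSp rest with
  | nil => exact absurd hts (splitSp_ne_nil rest)
  | cons t ts =>
    simp only [List.getLast?_cons_cons, List.dropLast]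
    split <;> rfl

theorem toks_no_space {n : List Char} (i : Char) (hn : ' ' ∉ n) (hi : i ≠ ' ') :
    toks (n ++ [i]) = [n ++ [i]] := by
  have hnn : ' ' ∉ n ++ [i] := by
    intro hm; rcases List.mem_append.mp hm with h1 | h1
    · exact hn h1
    · exact hi (List.mem_singleton.mp h1).symm
  have hne : (n ++ [i]) ≠ ([] : List Char) := by simp
  simp [toks, splitSp_no_space hnn, List.getLast?, hne]

theorem levGo_eq_toks : ∀ (cs : List Char) (idx total : Nat) (n code : List Char),
    total = idx + cs.length → cs ≠ [] → ' ' ∉ n →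
      levGo cs idx total n code = code ++ ((toks (n ++ cs)).map encTok).flatten := by
  intro cs
  induction cs with
  | nil => intro _ _ _ _ _ h; exact absurd rfl h
  | cons i rest ih =>
    intro idx total n code htot _ hn
    cases rest with
    | nil =>
      by_cases hi : i = ' '
      · subst hi
        have hsp : toks (n ++ [' ']) = [n] := by
          rw [toks_append_space [] hn]; rfl
        simp [levGo, hsp]
      · have hlast : idx = total - 1 := by subst htot; simp
        simp [levGo, hi, ← hlast, toks_no_space i hn hi]
    | cons r rs =>
      have hlen : total = (idx + 1) + (r :: rs).length := by subst htot; simp; try omega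
      by_cases hi : i = ' '
      · subst hi
        have step : levGo (' ' :: r :: rs) idx total n code
            = levGo (r :: rs) (idx + 1) total [] (code ++ encTok n) := by
          simp [levGo]
        rw [step, ih (idx + 1) total [] (code ++ encTok n) hlen (by simp) (by simp),
            toks_append_space (r :: rs) hn]
        simp
      · have hidx : idx ≠ total - 1 := by subst htot; simp; try omega
        have hnn : ' ' ∉ n ++ [i] := by
          intro hm; rcases List.mem_append.mp hm with h1 | h1
          · exact hn h1
          · exact hi (List.mem_singleton.mp h1).symm
        have step : levGo (i :: r :: rs) idx total n code
            = levGo (r :: rs) (idx + 1) total (n ++ [i]) code := by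
          simp [levGo, hi, hidx]
        rw [step, ih (idx + 1) total (n ++ [i]) code hlen (by simp) hnn]
        rw [List.append_assoc]; rfl

-- ===== VERDICT (by name: the statement is the Claim_ definition above) =====
theorem levenshtein_coding_spec : Claim_equal_levenshtein_coding := by
  unfold Claim_equal_levenshtein_coding
  intro numbers _ _
  unfold Spec_levenshtein_coding levenshtein_coding levenshtein_coding_alt
  cases hcs : numbers.toList with
  | nil => simp [levGo, splitSp]
  | cons c rest =>
    rw [levGo_eq_toks (c :: rest) 0 (c :: rest).length [] [] (by simp) (by simp) (by simp)]
    simp only [List.nil_append]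
    rfl
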